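-- pv_equiv track=rewrite | github.com/mwalto7/uva | tex.py | convert_quotes
-- ===== SOURCE A (Python) =====
-- def convert_quotes(text):
--     result = []
--     if '"' in text:
--         count = 0
--         for i, char in enumerate(text):
--             if char == '"':
--                 count += 1
--                 if count % 2 == 0:
--                     result.append("''")
--                 else:
--                     result.append("``")
--             else:
--                 result.append(char)
--     else:
--         result = text
--
--     return ''.join(result)
-- ===== SOURCE B (Python) =====
-- def convert_quotes(text):
--     parts = text.split('"')
--     pieces = [parts[0]]
--     for i, part in enumerate(parts[1:]):
--         pieces.append('``' if i % 2 == 0 else "''")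
--         pieces.append(part)
--     return ''.join(pieces)
-- ===== Notes on version B (the rewrite author's own statement) =====
-- stated objective: idiomatic
-- what changed: Replaces the per-character counted scan with splitting the text on the double-quote character and interleaving the alternating TeX separators between the parts.
import Mathlib
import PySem

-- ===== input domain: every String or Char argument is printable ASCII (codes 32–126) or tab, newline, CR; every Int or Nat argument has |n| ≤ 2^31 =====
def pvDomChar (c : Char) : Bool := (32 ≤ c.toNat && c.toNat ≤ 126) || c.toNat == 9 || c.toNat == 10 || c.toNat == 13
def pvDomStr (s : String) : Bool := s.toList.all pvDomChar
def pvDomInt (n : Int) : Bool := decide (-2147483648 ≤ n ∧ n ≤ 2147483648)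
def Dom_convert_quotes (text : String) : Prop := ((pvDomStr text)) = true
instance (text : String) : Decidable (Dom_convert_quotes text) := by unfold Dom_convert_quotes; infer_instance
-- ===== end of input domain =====

-- B replaces A's per-character counted scan by splitting on the double-quote character and
-- interleaving the alternating TeX separators (idiomatic decomposition; same cost). Both are
-- total; no Pre_ needed.

-- ===== PORT A =====
-- counted scan: walk the characters, count quotes, emit `` on odd, '' on even quotes
def convert_quotes (text : String) : String :=
  if PySem.Str.isIn "\"" text then
    let st := text.toList.foldl
      (fun (st : List String × Int) c =>
        if c == '"' then
          let count := st.2 + 1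
          if PySem.Int.mod count 2 == 0 then (st.1 ++ ["''"], count)
          else (st.1 ++ ["``"], count)
        else (st.1 ++ [c.toString], st.2))
      ([], 0)
    PySem.Str.join "" st.1
  else
    -- Python: result = text; ''.join(text) re-joins the characters of text, i.e. text itself
    text

-- ===== PORT B =====
def convert_quotes_alt (text : String) : String :=
  match PySem.Str.split? text "\"" with
  | none => text          -- unreachable: the separator '"' is nonempty
  | some parts =>
    match parts with
    | [] => ""            -- unreachable: str.split always returns at least one part
    | p0 :: rest =>
      let pieces := (PySem.List.enumerate rest 0).foldl
        (fun (acc : List String) ip =>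
          acc ++ [if PySem.Int.mod ip.1 2 == 0 then "``" else "''", ip.2])
        [p0]
      PySem.Str.join "" pieces

-- ===== PRECONDITION & SPEC =====
def Spec_convert_quotes (text : String) (out : String) : Prop := out = convert_quotes_alt text
instance (text : String) (out : String) : Decidable (Spec_convert_quotes text out) := by unfold Spec_convert_quotes; infer_instance

-- ===== CLAIM (what is proved, stated in full; the proofs are below) =====
def Claim_equal_convert_quotes : Prop := ∀ (text : String), Dom_convert_quotes text → Spec_convert_quotes text (convert_quotes text)

-- ===== LEMMAS AND PROOFS =====

-- structural split on '"'
def spl : List Char → List (List Char)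
  | [] => [[]]
  | c :: cs =>
    if c = '"' then [] :: spl cs
    else
      match spl cs with
      | [] => [[c]]
      | p :: ps => (c :: p) :: ps

-- A's output at char level
def agoC : List Char → Int → List Char
  | [], _ => []
  | c :: cs, k =>
    if c = '"' then
      (if PySem.Int.mod (k + 1) 2 == 0 then ['\'', '\''] else ['`', '`']) ++ agoC cs (k + 1)
    else c :: agoC cs k

-- B's interleaving at char level
def bgo : List (List Char) → Int → List Char
  | [], _ => []
  | p :: ps, i =>
    (if PySem.Int.mod i 2 == 0 then ['`', '`'] else ['\'', '\'']) ++ p ++ bgo ps (i + 1)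

def mapHead (f : List Char → List Char) : List (List Char) → List (List Char)
  | [] => []
  | p :: ps => f p :: ps

lemma spl_ne_nil (l : List Char) : spl l ≠ [] := by
  cases l with
  | nil => simp [spl]
  | cons c cs =>
    simp only [spl]
    split_ifs
    · simp
    · cases h : spl cs <;> simp

lemma splitOn_go_char (fuel : Nat) :
    ∀ (l cur : List Char) (acc : List (List Char)), l.length ≤ fuel →
      PySem.Chars.splitOn.go ['"'] fuel l cur acc
        = acc.reverse ++ mapHead (cur.reverse ++ ·) (spl l) := by
  induction fuel with
  | zero =>
    intro l cur acc h
    have : l = [] := List.eq_nil_of_length_eq_zero (Nat.le_zero.mp h)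
    subst this
    rw [PySem.Chars.splitOn.go.eq_def]
    simp [spl, mapHead]
  | succ fuel ih =>
    intro l cur acc h
    cases l with
    | nil =>
      rw [PySem.Chars.splitOn.go.eq_def]
      simp [spl, mapHead]
    | cons c rest =>
      rw [PySem.Chars.splitOn.go.eq_def]
      simp only [List.isPrefixOf, List.length_cons] at *
      by_cases hc : c = '"'
      · subst hc
        simp only [beq_self_eq_true, Bool.true_and]
        rw [if_pos (by simp [List.isPrefixOf])]
        simp only [List.length_cons, List.length_nil, Nat.zero_add, List.drop_succ_cons, List.drop_zero]
        rw [ih rest [] (cur.reverse :: acc) (by omega)]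
        simp only [spl, if_pos rfl, mapHead]
        cases h' : spl rest with
        | nil => exact absurd h' (spl_ne_nil rest)
        | cons p ps => simp [mapHead]
      · rw [if_neg (by simp [List.isPrefixOf]; exact fun h => hc h.symm)]
        rw [ih rest (c :: cur) acc (by omega)]
        simp only [spl, if_neg hc]
        cases h' : spl rest with
        | nil => exact absurd h' (spl_ne_nil rest)
        | cons p ps => simp [mapHead]

lemma splitOn_char (l : List Char) : PySem.Chars.splitOn l ['"'] = spl l := by
  rw [PySem.Chars.splitOn.eq_def, splitOn_go_char (l.length + 1) l [] [] (by omega)]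
  cases h : spl l with
  | nil => exact absurd h (spl_ne_nil l)
  | cons p ps => simp [mapHead]

lemma toList_sq : ("''" : String).toList = ['\'', '\''] := by decide
lemma toList_bq : ("``" : String).toList = ['`', '`'] := by decide
lemma toList_charToString (c : Char) : c.toString.toList = [c] := by simp

lemma join_nil_flatten (ps : List (List Char)) : PySem.Chars.join [] ps = ps.flatten := by
  induction ps with
  | nil => simp [PySem.Chars.join_nil]
  | cons p ps ih =>
    cases ps with
    | nil => simp [PySem.Chars.join_singleton]
    | cons q rest => rw [PySem.Chars.join_cons_cons]; simp_all

-- A's fold, flattened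
lemma A_fold (cs : List Char) : ∀ (acc : List String) (k : Int),
    ((cs.foldl
      (fun (st : List String × Int) c =>
        if c == '"' then
          let count := st.2 + 1
          if PySem.Int.mod count 2 == 0 then (st.1 ++ ["''"], count)
          else (st.1 ++ ["``"], count)
        else (st.1 ++ [c.toString], st.2))
      (acc, k)).1.map String.toList).flatten
      = (acc.map String.toList).flatten ++ agoC cs k := by
  induction cs with
  | nil => intro acc k; simp [agoC]
  | cons c cs ih =>
    intro acc k
    simp only [List.foldl_cons, agoC]
    by_cases hc : c = '"'
    · subst hc
      simp only [beq_self_eq_true, if_pos rfl, if_true]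
      by_cases hm : PySem.Int.mod (k + 1) 2 = 0
      · simp only [hm, beq_self_eq_true, if_true, ih]
        simp [toList_sq]
      · rw [if_neg (by simpa using hm), if_neg (by simpa using hm)]
        rw [ih]
        simp [toList_bq]
    · rw [if_neg (by simpa using hc), if_neg (by simpa using hc), ih]
      simp [toList_charToString]

-- B's fold, flattened
lemma B_fold (rest : List String) : ∀ (acc : List String) (i : Int),
    (((PySem.List.enumerate rest i).foldl
      (fun (acc : List String) ip =>
        acc ++ [if PySem.Int.mod ip.1 2 == 0 then "``" else "''", ip.2])
      acc).map String.toList).flatten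
      = (acc.map String.toList).flatten ++ bgo (rest.map String.toList) i := by
  induction rest with
  | nil => intro acc i; simp [PySem.List.enumerate_nil, bgo]
  | cons p ps ih =>
    intro acc i
    rw [PySem.List.enumerate_cons]
    simp only [List.foldl_cons, List.map_cons, bgo, ih]
    by_cases hm : PySem.Int.mod i 2 = 0
    · rw [if_pos (by simpa using hm), if_pos (by simpa using hm)]
      simp [toList_bq]
    · rw [if_neg (by simpa using hm), if_neg (by simpa using hm)]
      simp [toList_sq]

lemma mod2_cases (k : Int) : PySem.Int.mod k 2 = 0 ∨ PySem.Int.mod k 2 = 1 := by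
  simp only [PySem.Int.mod, Int.fmod_eq_emod]
  omega

lemma mod2_succ (k : Int) : PySem.Int.mod (k + 1) 2 = 0 ↔ PySem.Int.mod k 2 = 1 := by
  simp only [PySem.Int.mod, Int.fmod_eq_emod]
  omega

-- glue: split + interleave reproduces the counted scan, given equal parities
lemma glue_main (l : List Char) : ∀ (i k : Int), PySem.Int.mod i 2 = PySem.Int.mod k 2 →
    (spl l).headI ++ bgo (spl l).tail i = agoC l k := by
  induction l with
  | nil => intro i k _; simp [spl, bgo, agoC]
  | cons c cs ih =>
    intro i k hpar
    cases h' : spl cs with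
    | nil => exact absurd h' (spl_ne_nil cs)
    | cons p psr =>
      by_cases hc : c = '"'
      · subst hc
        have hspl : spl ('"' :: cs) = [] :: p :: psr := by simp [spl, h']
        have hago : agoC ('"' :: cs) k
            = (if PySem.Int.mod (k + 1) 2 == 0 then ['\'', '\''] else ['`', '`']) ++ agoC cs (k + 1) := by
          simp [agoC]
        have ih' := ih (i + 1) (k + 1) (by simp only [PySem.Int.mod, Int.fmod_eq_emod] at *; omega)
        rw [h'] at ih'
        simp only [List.headI_cons, List.tail_cons] at ih'
        rw [hspl, hago]
        simp only [List.headI_cons, List.tail_cons, List.nil_append, bgo]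
        rw [List.append_assoc, ih']
        congr 1
        rcases mod2_cases k with h | h
        · have h0 : PySem.Int.mod i 2 = 0 := hpar.trans h
          have h1 : ¬ PySem.Int.mod (k + 1) 2 = 0 := by
            rw [mod2_succ]; omega
          rw [if_pos (by simpa using h0), if_neg (by simpa using h1)]
        · have h0 : ¬ PySem.Int.mod i 2 = 0 := by rw [hpar, h]; omega
          have h1 : PySem.Int.mod (k + 1) 2 = 0 := (mod2_succ k).mpr h
          rw [if_neg (by simpa using h0), if_pos (by simpa using h1)]
      · have hspl : spl (c :: cs) = (c :: p) :: psr := by simp [spl, hc, h']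
        have hago : agoC (c :: cs) k = c :: agoC cs k := by simp [agoC, hc]
        have ih' := ih i k hpar
        rw [h'] at ih'
        simp only [List.headI_cons, List.tail_cons] at ih'
        rw [hspl, hago]
        simp only [List.headI_cons, List.tail_cons]
        rw [List.cons_append, ih']

-- no quote in l → agoC l k = l
lemma agoC_no_quote (l : List Char) (h : '"' ∉ l) : agoC l 0 = l := by
  induction l with
  | nil => simp [agoC]
  | cons c cs ih =>
    simp only [List.mem_cons, not_or] at h
    have hc : ¬ c = '"' := fun hh => h.1 hh.symm
    simp [agoC, hc, ih h.2]

-- B's toList, in all cases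
lemma B_toList (text : String) :
    (convert_quotes_alt text).toList
      = (spl text.toList).headI ++ bgo (spl text.toList).tail 0 := by
  have hsplit : PySem.Str.split? text "\"" =
      some ((spl text.toList).map (fun cs => String.ofList cs)) := by
    have h1 := PySem.Str.split?_map text "\""
    rw [show ("\"" : String).toList = ['"'] from rfl] at h1
    rw [PySem.Chars.split?.eq_def] at h1
    simp only [List.isEmpty, Bool.false_eq_true, if_false] at h1
    rw [splitOn_char] at h1
    cases h2 : PySem.Str.split? text "\"" with
    | none => rw [h2] at h1; simp at h1
    | some parts =>
      rw [h2] at h1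
      have h3 : List.map String.toList parts = spl text.toList := by simpa using h1
      congr 1
      rw [← h3, List.map_map]
      simp only [Function.comp_def, String.ofList_toList, List.map_id']
  unfold convert_quotes_alt
  rw [hsplit]
  cases h' : spl text.toList with
  | nil => exact absurd h' (spl_ne_nil _)
  | cons p ps =>
    simp only [List.map_cons, List.headI_cons, List.tail_cons]
    rw [PySem.Str.toList_join, show ("" : String).toList = ([] : List Char) from rfl, join_nil_flatten]
    have := B_fold (ps.map (fun cs => String.ofList cs)) [String.ofList p] 0
    rw [this]
    simp only [List.map_map, Function.comp_def, String.toList_ofList, List.map_id',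
      List.map_cons, List.map_nil, List.flatten_cons, List.flatten_nil, List.append_nil]

-- ===== VERDICT (by name: the statement is the Claim_ definition above) =====
theorem convert_quotes_spec : Claim_equal_convert_quotes := by
  intro text _
  unfold Spec_convert_quotes
  rw [← String.toList_inj, B_toList, glue_main text.toList 0 0 rfl]
  by_cases hin : PySem.Str.isIn "\"" text = true
  · simp only [convert_quotes, hin, if_true]
    rw [PySem.Str.toList_join, show ("" : String).toList = ([] : List Char) from rfl, join_nil_flatten]
    rw [A_fold text.toList [] 0]
    simp
  · simp only [convert_quotes, hin, Bool.false_eq_true, if_false]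
    have hnm : '"' ∉ text.toList := by
      have hiff := PySem.Chars.isIn_eq_false_iff ("\"" : String).toList text.toList
      rw [show ("\"" : String).toList = ['"'] from rfl] at hiff
      have h2 : PySem.Chars.isIn ['"'] text.toList = false := by
        have he : PySem.Str.isIn "\"" text = PySem.Chars.isIn ['"'] text.toList := by
          simp [PySem.Str.isIn]
        rw [← he]; simpa using hin
      intro hmem
      exact (hiff.mp h2) ((List.singleton_infix_iff _ _).mpr hmem)
    rw [agoC_no_quote _ hnm]
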